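-- pv_equiv track=rewrite | github.com/care0717/dev | ocn_cipher/opencv.py | get_black_part_indexs
-- ===== SOURCE A (Python) =====
-- def get_black_part_indexs(img):
--     res = []
--     before_v = img[0]
--     temp = []
--     for i,value in enumerate(img):
--         if(value != before_v):
--             temp.append(i)
--             before_v = value
--         if(len(temp) == 2):
--             res.append(temp)
--             temp = []
--     return res
-- ===== SOURCE B (Python) =====
-- def get_black_part_indexs(img):
--     n = len(img)
--
--     def find_diff(i, v):
--         # first index j >= i with img[j] != v, or n
--         while i < n and img[i] == v:
--             i += 1
--         return i
--
--     res = []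
--     a = find_diff(0, img[0])
--     while a < n:
--         b = find_diff(a, img[a])
--         if b >= n:
--             break
--         res.append([a, b])
--         a = find_diff(b, img[b])
--     return res
-- ===== Notes on version B (the rewrite author's own statement) =====
-- stated objective: alternative
-- what changed: B drops A's single enumerate pass with a rolling before_v and a two-slot temp buffer flushed inline; instead it jumps from run boundary to run boundary with a find_diff(i, v) search helper, an outer loop that locates two consecutive boundaries per iteration and emits them as a pair directly, skipping over whole runs between emissions.
import Mathlib
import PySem

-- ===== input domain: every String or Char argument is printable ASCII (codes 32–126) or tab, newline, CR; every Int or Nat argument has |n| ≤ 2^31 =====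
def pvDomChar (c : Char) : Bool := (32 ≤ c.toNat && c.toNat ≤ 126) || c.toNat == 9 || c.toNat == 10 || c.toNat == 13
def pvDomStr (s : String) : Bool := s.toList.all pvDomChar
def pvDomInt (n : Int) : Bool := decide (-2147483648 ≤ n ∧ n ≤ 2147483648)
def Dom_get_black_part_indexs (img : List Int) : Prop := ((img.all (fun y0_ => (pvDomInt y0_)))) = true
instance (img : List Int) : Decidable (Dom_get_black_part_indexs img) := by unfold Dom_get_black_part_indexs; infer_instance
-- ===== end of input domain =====

-- B replaces A's one-pass rolling-buffer scan by a boundary-jumping search: a find_diff helper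
-- locates the next run boundary and an outer loop emits two boundaries per iteration
-- (objective: alternative decomposition, same O(n) cost).

-- ===== PORT A =====
-- loop body of A: update (res, before_v, temp) for one enumerated element (i, value)
def pvStepA (st : List (List Int) × Int × List Int) (iv : Int × Int) :
    List (List Int) × Int × List Int :=
  let tb := if iv.2 ≠ st.2.1 then (st.2.2 ++ [iv.1], iv.2) else (st.2.2, st.2.1)
  if tb.1.length = 2 then (st.1 ++ [tb.1], tb.2, ([] : List Int)) else (st.1, tb.2, tb.1)

def get_black_part_indexs (img : List Int) : List (List Int) :=
  match PySem.List.pyGet? img 0 with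
  | none => []   -- Python raises IndexError on img[0] here; excluded by Pre_
  | some bv0 => ((PySem.List.enumerate img 0).foldl pvStepA ([], bv0, ([] : List Int))).1

-- ===== PORT B =====
-- find_diff(i, v): first index j >= i with img[j] != v, or len(img);
-- the while loop is ported with fuel (img.length + 1 - i always suffices)
def pvFindDiffAux (img : List Int) (v : Int) : Nat → Nat → Nat
  | i, fuel + 1 =>
    if h : i < img.length then
      if img[i] = v then pvFindDiffAux img v (i + 1) fuel else i
    else i
  | i, 0 => i

def pvFindDiff (img : List Int) (v : Int) (i : Nat) : Nat :=
  pvFindDiffAux img v i (img.length + 1 - i)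

-- outer while loop of B: emit one pair [a, b] per iteration, then jump past b's run;
-- again fuel-guarded (a grows by at least 2 per iteration, so the fuel suffices)
def pvPairsAux (img : List Int) : Nat → Nat → List (List Int)
  | a, fuel + 1 =>
    if h : a < img.length then
      if hb : pvFindDiff img img[a] a < img.length then
        [(a : Int), (pvFindDiff img img[a] a : Int)]
          :: pvPairsAux img
              (pvFindDiff img img[pvFindDiff img img[a] a] (pvFindDiff img img[a] a)) fuel
      else []
    else []
  | _, 0 => []

def pvPairs (img : List Int) (a : Nat) : List (List Int) :=
  pvPairsAux img a (img.length + 1 - a)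

def get_black_part_indexs_alt (img : List Int) : List (List Int) :=
  match PySem.List.pyGet? img 0 with
  | none => []   -- Python raises IndexError on img[0] here; excluded by Pre_
  | some v0 => pvPairs img (pvFindDiff img v0 0)

-- ===== PRECONDITION & SPEC =====
-- Pre_ excludes only the empty list, on which A raises IndexError (img[0]).
def Pre_get_black_part_indexs (img : List Int) : Prop := img ≠ []
instance (img : List Int) : Decidable (Pre_get_black_part_indexs img) := by
  unfold Pre_get_black_part_indexs; infer_instance
def pvWitness_get_black_part_indexs : List Int := [0, 1, 1, 0, 2]

def Spec_get_black_part_indexs (img : List Int) (out : List (List Int)) : Prop :=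
  out = get_black_part_indexs_alt img
instance (img : List Int) (out : List (List Int)) : Decidable (Spec_get_black_part_indexs img out) := by
  unfold Spec_get_black_part_indexs; infer_instance

-- ===== CLAIM (what is proved, stated in full; the proofs are below) =====
def Claim_equal_get_black_part_indexs : Prop := ∀ (img : List Int),
  Dom_get_black_part_indexs img → Pre_get_black_part_indexs img →
  Spec_get_black_part_indexs img (get_black_part_indexs img)

-- ===== LEMMAS AND PROOFS =====

-- fuel irrelevance: any fuel covering the remaining indices gives the same result
lemma pvFindDiffAux_irrel (img : List Int) (v : Int) : ∀ (f1 f2 i : Nat),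
    img.length ≤ i + f1 → img.length ≤ i + f2 →
    pvFindDiffAux img v i f1 = pvFindDiffAux img v i f2 := by
  intro f1
  induction f1 with
  | zero =>
    intro f2 i h1 h2
    cases f2 with
    | zero => rfl
    | succ g => simp only [pvFindDiffAux]; rw [dif_neg (by omega)]
  | succ f ih =>
    intro f2 i h1 h2
    cases f2 with
    | zero => simp only [pvFindDiffAux]; rw [dif_neg (by omega)]
    | succ g =>
      simp only [pvFindDiffAux]
      by_cases h : i < img.length
      · rw [dif_pos h, dif_pos h]
        by_cases hv : img[i] = v
        · rw [if_pos hv, if_pos hv]; exact ih g (i + 1) (by omega) (by omega)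
        · rw [if_neg hv, if_neg hv]
      · rw [dif_neg h, dif_neg h]

-- the one-step unfolding of pvFindDiff, fuel hidden
lemma pvFindDiff_eq (img : List Int) (v : Int) (i : Nat) :
    pvFindDiff img v i
      = if h : i < img.length then
          (if img[i] = v then pvFindDiff img v (i + 1) else i)
        else i := by
  unfold pvFindDiff
  by_cases h : i < img.length
  · have hf : img.length + 1 - i = (img.length - i) + 1 := by omega
    rw [hf, dif_pos h]
    simp only [pvFindDiffAux]
    rw [dif_pos h]
    by_cases hv : img[i] = v
    · rw [if_pos hv, if_pos hv]
      exact pvFindDiffAux_irrel img v (img.length - i) (img.length + 1 - (i + 1)) (i + 1)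
        (by omega) (by omega)
    · rw [if_neg hv, if_neg hv]
  · rw [dif_neg h]
    cases hf : img.length + 1 - i with
    | zero => rfl
    | succ g => simp only [pvFindDiffAux]; rw [dif_neg h]

lemma pvFindDiff_ge (img : List Int) (v : Int) : ∀ (i : Nat), i ≤ pvFindDiff img v i := by
  have haux : ∀ (fuel i : Nat), i ≤ pvFindDiffAux img v i fuel := by
    intro fuel
    induction fuel with
    | zero => intro i; exact Nat.le_refl i
    | succ f ih =>
      intro i
      simp only [pvFindDiffAux]
      split
      · split
        · exact Nat.le_trans (Nat.le_succ i) (ih (i + 1))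
        · exact Nat.le_refl i
      · exact Nat.le_refl i
  intro i; exact haux _ i

lemma pvFindDiff_gt (img : List Int) (i : Nat) (h : i < img.length) :
    i + 1 ≤ pvFindDiff img img[i] i := by
  rw [pvFindDiff_eq, dif_pos h, if_pos rfl]
  exact pvFindDiff_ge img img[i] (i + 1)

lemma pvFindDiff_stop (img : List Int) (v : Int) (i : Nat) (h : ¬ i < img.length) :
    pvFindDiff img v i = i := by
  rw [pvFindDiff_eq, dif_neg h]

lemma pvPairsAux_irrel (img : List Int) : ∀ (f1 f2 a : Nat),
    img.length + 1 ≤ a + f1 → img.length + 1 ≤ a + f2 →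
    pvPairsAux img a f1 = pvPairsAux img a f2 := by
  intro f1
  induction f1 with
  | zero =>
    intro f2 a h1 h2
    cases f2 with
    | zero => rfl
    | succ g => simp only [pvPairsAux]; rw [dif_neg (by omega)]
  | succ f ih =>
    intro f2 a h1 h2
    cases f2 with
    | zero => simp only [pvPairsAux]; rw [dif_neg (by omega)]
    | succ g =>
      simp only [pvPairsAux]
      by_cases h : a < img.length
      · rw [dif_pos h, dif_pos h]
        by_cases hb : pvFindDiff img img[a] a < img.length
        · rw [dif_pos hb, dif_pos hb]
          have h1' : a + 1 ≤ pvFindDiff img img[a] a := pvFindDiff_gt img a h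
          have h2' : pvFindDiff img img[a] a + 1
              ≤ pvFindDiff img img[pvFindDiff img img[a] a] (pvFindDiff img img[a] a) :=
            pvFindDiff_gt img _ hb
          rw [ih g _ (by omega) (by omega)]
        · rw [dif_neg hb, dif_neg hb]
      · rw [dif_neg h, dif_neg h]

-- the one-step unfolding of pvPairs, fuel hidden
lemma pvPairs_eq (img : List Int) (a : Nat) :
    pvPairs img a
      = if h : a < img.length then
          (if hb : pvFindDiff img img[a] a < img.length then
            [(a : Int), (pvFindDiff img img[a] a : Int)]
              :: pvPairs img (pvFindDiff img img[pvFindDiff img img[a] a] (pvFindDiff img img[a] a))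
          else [])
        else [] := by
  unfold pvPairs
  by_cases h : a < img.length
  · have hf : img.length + 1 - a = (img.length - a) + 1 := by omega
    rw [hf, dif_pos h]
    simp only [pvPairsAux]
    rw [dif_pos h]
    by_cases hb : pvFindDiff img img[a] a < img.length
    · rw [dif_pos hb, dif_pos hb]
      have h1' : a + 1 ≤ pvFindDiff img img[a] a := pvFindDiff_gt img a h
      have h2' : pvFindDiff img img[a] a + 1
          ≤ pvFindDiff img img[pvFindDiff img img[a] a] (pvFindDiff img img[a] a) :=
        pvFindDiff_gt img _ hb
      rw [pvPairsAux_irrel img (img.length - a)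
            (img.length + 1 - pvFindDiff img img[pvFindDiff img img[a] a] (pvFindDiff img img[a] a))
            (pvFindDiff img img[pvFindDiff img img[a] a] (pvFindDiff img img[a] a))
            (by omega) (by omega)]
    · rw [dif_neg hb, dif_neg hb]
  · rw [dif_neg h]
    cases hf : img.length + 1 - a with
    | zero => rfl
    | succ g => simp only [pvPairsAux]; rw [dif_neg h]

-- group a list of transition indices into consecutive pairs, dropping a trailing odd one
def pvPairUp : List Int → List (List Int)
  | a :: b :: rest => [a, b] :: pvPairUp rest
  | _ => []

-- the list of transition indices, starting from previous value bv at index s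
def pvTrans : Int → Int → List Int → List Int
  | _, _, [] => []
  | bv, s, v :: rest => if v ≠ bv then s :: pvTrans v (s + 1) rest else pvTrans v (s + 1) rest

lemma pvFoldA (l : List Int) : ∀ (s : Int) (res : List (List Int)) (bv : Int) (t : List Int),
    (t = [] ∨ ∃ x, t = [x]) →
    ((PySem.List.enumerate l s).foldl pvStepA (res, bv, t)).1
      = res ++ pvPairUp (t ++ pvTrans bv s l) := by
  induction l with
  | nil =>
    intro s res bv t ht
    rcases ht with rfl | ⟨x, rfl⟩ <;> simp [PySem.List.enumerate_nil, pvTrans, pvPairUp]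
  | cons v rest ih =>
    intro s res bv t ht
    rw [PySem.List.enumerate_cons, List.foldl_cons]
    by_cases hv : v = bv
    · have hstep : pvStepA (res, bv, t) (s, v) = (res, bv, t) := by
        rcases ht with rfl | ⟨x, rfl⟩ <;> simp [pvStepA, hv]
      rw [hstep, ih (s + 1) res bv t ht]
      simp [pvTrans, hv]
    · rcases ht with rfl | ⟨x, rfl⟩
      · have hstep : pvStepA (res, bv, ([] : List Int)) (s, v) = (res, v, [s]) := by
          simp [pvStepA, hv]
        rw [hstep, ih (s + 1) res v [s] (Or.inr ⟨s, rfl⟩)]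
        simp [pvTrans, hv]
      · have hstep : pvStepA (res, bv, [x]) (s, v) = (res ++ [[x, s]], v, ([] : List Int)) := by
          simp [pvStepA, hv]
        rw [hstep, ih (s + 1) (res ++ [[x, s]]) v [] (Or.inl rfl)]
        simp [pvTrans, pvPairUp, hv]

-- pvFindDiff computes the head of pvTrans on the corresponding suffix
lemma pvF (img : List Int) : ∀ (k i : Nat), img.length - i ≤ k → ∀ (v : Int),
    pvTrans v (i : Int) (img.drop i)
      = (if h : pvFindDiff img v i < img.length
         then ((pvFindDiff img v i : Nat) : Int)
              :: pvTrans img[pvFindDiff img v i] ((pvFindDiff img v i : Nat) + 1)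
                  (img.drop (pvFindDiff img v i + 1))
         else []) := by
  intro k
  induction k with
  | zero =>
    intro i hk v
    have hi : img.length ≤ i := by omega
    have hd : img.drop i = [] := List.drop_eq_nil_of_le hi
    rw [hd, pvFindDiff_stop img v i (by omega), dif_neg (by omega)]
    rfl
  | succ k ih =>
    intro i hk v
    by_cases h : i < img.length
    · have hd : img.drop i = img[i] :: img.drop (i + 1) := List.drop_eq_getElem_cons h
      rw [hd]
      show (if img[i] ≠ v then _ else _) = _
      by_cases hv : img[i] = v
      · rw [if_neg (by simp [hv])]
        have hfd : pvFindDiff img v i = pvFindDiff img v (i + 1) := by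
          rw [pvFindDiff_eq, dif_pos h, if_pos hv]
        have := ih (i + 1) (by omega) v
        rw [hfd, hv]
        push_cast at this ⊢
        exact this
      · have hfd : pvFindDiff img v i = i := by
          rw [pvFindDiff_eq, dif_pos h, if_neg hv]
        rw [if_pos (by simp [hv]), hfd, dif_pos h]
    · have hi : img.length ≤ i := by omega
      rw [List.drop_eq_nil_of_le hi, pvFindDiff_stop img v i (by omega), dif_neg (by omega)]
      rfl

-- pvPairs starting at a boundary a equals pairing the transition list from a on
lemma pvP (img : List Int) : ∀ (k a : Nat), img.length - a ≤ k →
    pvPairs img a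
      = pvPairUp (if h : a < img.length
          then ((a : Nat) : Int) :: pvTrans img[a] ((a : Nat) + 1) (img.drop (a + 1))
          else []) := by
  intro k
  induction k with
  | zero =>
    intro a hk
    rw [pvPairs_eq, dif_neg (by omega), dif_neg (by omega)]
    rfl
  | succ k ih =>
    intro a hk
    by_cases h : a < img.length
    · rw [pvPairs_eq, dif_pos h, dif_pos h]
      set b := pvFindDiff img img[a] a with hb
      have hba : a + 1 ≤ b := pvFindDiff_gt img a h
      have hbeq : pvFindDiff img img[a] (a + 1) = b := by
        rw [hb]; conv_rhs => rw [pvFindDiff_eq, dif_pos h, if_pos rfl]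
      have hF := pvF img (img.length) (a + 1) (by omega) img[a]
      rw [hbeq] at hF
      by_cases hbl : b < img.length
      · rw [dif_pos hbl]
        have hgt : b + 1 ≤ pvFindDiff img img[b] b := pvFindDiff_gt img b hbl
        have hnext : pvFindDiff img img[b] (b + 1) = pvFindDiff img img[b] b := by
          conv_rhs => rw [pvFindDiff_eq, dif_pos hbl, if_pos rfl]
        rw [dif_pos hbl] at hF
        have hF2 := pvF img img.length (b + 1) (by omega) img[b]
        rw [hnext] at hF2
        have hih := ih (pvFindDiff img img[b] b) (by omega)
        push_cast at hF hF2 ⊢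
        rw [hF, hF2]
        show [(a : Int), (b : Int)] :: pvPairs img (pvFindDiff img img[b] b) = _
        rw [pvPairUp, hih]
      · rw [dif_neg hbl]
        rw [dif_neg hbl] at hF
        push_cast at hF ⊢
        rw [hF]
        rfl
    · rw [pvPairs_eq, dif_neg h, dif_neg h]
      rfl

-- ===== VERDICT (by name: the statement is the Claim_ definition above) =====
theorem get_black_part_indexs_spec : Claim_equal_get_black_part_indexs := by
  intro img _ hpre
  unfold Spec_get_black_part_indexs
  obtain ⟨h, tl, rfl⟩ : ∃ h tl, img = h :: tl := by
    cases img with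
    | nil => exact absurd rfl hpre
    | cons h tl => exact ⟨h, tl, rfl⟩
  have hA : get_black_part_indexs (h :: tl)
      = ((PySem.List.enumerate (h :: tl) 0).foldl pvStepA ([], h, ([] : List Int))).1 := by
    unfold get_black_part_indexs
    rw [PySem.List.pyGet?_zero_cons]
  have htr : pvTrans h 0 (h :: tl) = pvTrans h 1 ((h :: tl).drop 1) := by
    simp [pvTrans]
  have h0 : pvFindDiff (h :: tl) h 0 = pvFindDiff (h :: tl) h 1 := by
    conv_lhs => rw [pvFindDiff_eq]
    simp
  have hF := pvF (h :: tl) (h :: tl).length 1 (by omega) h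
  have hB : get_black_part_indexs_alt (h :: tl) = pvPairs (h :: tl) (pvFindDiff (h :: tl) h 0) := by
    unfold get_black_part_indexs_alt
    rw [PySem.List.pyGet?_zero_cons]
  push_cast at hF
  rw [hA, pvFoldA (h :: tl) 0 [] h [] (Or.inl rfl), List.nil_append, hB, htr, h0, hF]
  set a0 := pvFindDiff (h :: tl) h 1 with ha0
  have hP := pvP (h :: tl) (h :: tl).length a0 (by omega)
  rw [hP, List.nil_append]
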